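-- pv_equiv track=rewrite | github.com/AJBats/saturn-daytona-usa-re | tools/bulk_fix_round4.py | fix_missing_func_name
-- ===== SOURCE A (Python) =====
-- def fix_missing_func_name(text):
--     """Fix files where function name is missing: 'int \\n{' -> 'int _unknown_()'."""
--     changes = 0
--     lines = text.split('\n')
--     new_lines = []
--     for i, line in enumerate(lines):
--         stripped = line.strip()
--         if (stripped in ('int', 'int *', 'void', 'unsigned int') and
--                 i + 1 < len(lines) and lines[i + 1].strip() == '{'):
--             # Missing function name
--             # Try to get name from filename context
--             new_lines.append(stripped + ' _unknown_()')
--             changes += 1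
--         elif (stripped == 'int *' and
--               i + 1 < len(lines) and lines[i + 1].strip() == '{'):
--             new_lines.append('int * _unknown_()')
--             changes += 1
--         else:
--             new_lines.append(line)
--     return '\n'.join(new_lines), changes
-- ===== SOURCE B (Python) =====
-- def fix_missing_func_name(text):
--     """Fix files where function name is missing: 'int \n{' -> 'int _unknown_()'."""
--     lines = text.split('\n')
--     out = []
--     changes = 0
--     next_is_brace = False  # does the line AFTER the current one strip to '{'?
--     for line in reversed(lines):
--         stripped = line.strip()
--         if next_is_brace and stripped in ('int', 'int *', 'void', 'unsigned int'):
--             out.append(stripped + ' _unknown_()')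
--             changes += 1
--         else:
--             out.append(line)
--         next_is_brace = (stripped == '{')
--     out.reverse()
--     return '\n'.join(out), changes
-- ===== Notes on version B (the rewrite author's own statement) =====
-- stated objective: alternative
-- what changed: Replaces the indexed forward scan with lines[i+1] lookahead (and its dead duplicate elif branch) by a single reversed-order pass carrying a boolean flag recording whether the following line strips to an opening brace, building the output back-to-front and reversing it once; no indexing and no enumerate.
import Mathlib
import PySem

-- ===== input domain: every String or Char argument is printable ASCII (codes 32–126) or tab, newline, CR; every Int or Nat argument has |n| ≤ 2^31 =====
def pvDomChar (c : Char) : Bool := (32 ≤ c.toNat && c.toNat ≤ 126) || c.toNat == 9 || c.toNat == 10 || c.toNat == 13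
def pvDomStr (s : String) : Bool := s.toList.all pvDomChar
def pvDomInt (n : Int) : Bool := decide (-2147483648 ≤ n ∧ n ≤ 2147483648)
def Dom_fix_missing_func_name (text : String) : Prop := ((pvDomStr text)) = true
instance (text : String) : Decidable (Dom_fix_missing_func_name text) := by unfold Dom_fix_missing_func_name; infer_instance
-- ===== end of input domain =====

-- B replaces A's indexed lookahead scan by a reversed single pass carrying a brace-line flag (objective: alternative decomposition, same cost).

-- ===== PORT A =====
-- Literal port of A: split on '\n', loop over enumerate(lines) with lines[i+1]
-- lookahead (including the unreachable duplicate 'elif' branch), join at the end.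
def fix_missing_func_name (text : String) : String × Int :=
  let lines := (PySem.Str.split? text "\n").getD []
  let res := (PySem.List.enumerate lines).foldl
    (fun (st : List String × Int) (p : Int × String) =>
      let i := p.1
      let line := p.2
      let stripped := PySem.Str.strip line
      if (stripped = "int" ∨ stripped = "int *" ∨ stripped = "void" ∨ stripped = "unsigned int") ∧
          i + 1 < PySem.List.len lines ∧
          PySem.Str.strip (PySem.List.pyGetD lines (i + 1) "") = "{" then
        (st.1 ++ [stripped ++ " _unknown_()"], st.2 + 1)
      else if stripped = "int *" ∧
          i + 1 < PySem.List.len lines ∧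
          PySem.Str.strip (PySem.List.pyGetD lines (i + 1) "") = "{" then
        (st.1 ++ ["int * _unknown_()"], st.2 + 1)
      else
        (st.1 ++ [line], st.2))
    (([] : List String), (0 : Int))
  (PySem.Str.join "\n" res.1, res.2)

-- ===== PORT B =====
-- Literal port of B (Source B): fold over reversed(lines) carrying (out, changes, next_is_brace),
-- appending as Python's out.append does, then out.reverse().
def fix_missing_func_name_alt (text : String) : String × Int :=
  let lines := (PySem.Str.split? text "\n").getD []
  let res := lines.reverse.foldl
    (fun (st : List String × Int × Bool) (line : String) =>
      let stripped := PySem.Str.strip line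
      let st' :=
        if st.2.2 = true ∧ (stripped = "int" ∨ stripped = "int *" ∨ stripped = "void" ∨ stripped = "unsigned int") then
          (st.1 ++ [stripped ++ " _unknown_()"], st.2.1 + 1)
        else
          (st.1 ++ [line], st.2.1)
      (st'.1, st'.2, decide (stripped = "{")))
    (([] : List String), (0 : Int), false)
  (PySem.Str.join "\n" res.1.reverse, res.2.1)

-- ===== PRECONDITION & SPEC =====
def Spec_fix_missing_func_name (text : String) (out : String × Int) : Prop := out = fix_missing_func_name_alt text
instance (text : String) (out : String × Int) : Decidable (Spec_fix_missing_func_name text out) := by unfold Spec_fix_missing_func_name; infer_instance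

-- ===== CLAIM (what is proved, stated in full; the proofs are below) =====
def Claim_equal_fix_missing_func_name : Prop := ∀ (text : String), Dom_fix_missing_func_name text → Spec_fix_missing_func_name text (fix_missing_func_name text)

-- ===== LEMMAS AND PROOFS =====

-- Reference recursion: result lines and change count, looking one line ahead.
def pvSpecRec : List String → List String × Int
  | [] => ([], 0)
  | l :: rest =>
    let r := pvSpecRec rest
    let nb := rest.head?.map PySem.Str.strip = some "{"
    if (PySem.Str.strip l = "int" ∨ PySem.Str.strip l = "int *" ∨ PySem.Str.strip l = "void" ∨ PySem.Str.strip l = "unsigned int") ∧ nb then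
      (((PySem.Str.strip l) ++ " _unknown_()") :: r.1, r.2 + 1)
    else
      (l :: r.1, r.2)

theorem pvSpecRec_cons (l : String) (rest : List String) :
    pvSpecRec (l :: rest)
      = (if (PySem.Str.strip l = "int" ∨ PySem.Str.strip l = "int *" ∨ PySem.Str.strip l = "void" ∨ PySem.Str.strip l = "unsigned int") ∧ rest.head?.map PySem.Str.strip = some "{" then
          (((PySem.Str.strip l) ++ " _unknown_()") :: (pvSpecRec rest).1, (pvSpecRec rest).2 + 1)
        else (l :: (pvSpecRec rest).1, (pvSpecRec rest).2)) := rfl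

theorem pvLoopA (lines : List String) :
    ∀ (k : Nat) (suf : List String), suf = lines.drop k →
    ∀ (acc : List String) (n : Int),
    (PySem.List.enumerate suf (k : Int)).foldl
      (fun (st : List String × Int) (p : Int × String) =>
        let i := p.1
        let line := p.2
        let stripped := PySem.Str.strip line
        if (stripped = "int" ∨ stripped = "int *" ∨ stripped = "void" ∨ stripped = "unsigned int") ∧
            i + 1 < PySem.List.len lines ∧
            PySem.Str.strip (PySem.List.pyGetD lines (i + 1) "") = "{" then
          (st.1 ++ [stripped ++ " _unknown_()"], st.2 + 1)
        else if stripped = "int *" ∧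
            i + 1 < PySem.List.len lines ∧
            PySem.Str.strip (PySem.List.pyGetD lines (i + 1) "") = "{" then
          (st.1 ++ ["int * _unknown_()"], st.2 + 1)
        else
          (st.1 ++ [line], st.2))
      (acc, n)
    = (acc ++ (pvSpecRec suf).1, n + (pvSpecRec suf).2) := by
  intro k suf
  induction suf generalizing k with
  | nil => intro _ acc n; simp [PySem.List.enumerate, pvSpecRec]
  | cons l rest ih =>
    intro hs acc n
    have hlen : lines.length = k + 1 + rest.length := by
      have := congrArg List.length hs
      simp at this
      omega
    have hk : k < lines.length := by omega
    have hdrop : lines.drop (k + 1) = rest := by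
      rw [← List.tail_drop, ← hs]; rfl
    have hnext : PySem.List.pyGetD lines ((k : Int) + 1) "" = rest.headD "" := by
      rcases rest with _ | ⟨r, rs⟩
      · rcases hd : lines[(k+1)]? with _ | v
        · have : PySem.List.pyGetD lines ((k:Int)+1) "" = "" := by
            have : ((k : Int) + 1) = ((k + 1 : Nat) : Int) := by push_cast; ring
            rw [this, PySem.List.pyGetD_natCast]
            simp [List.getD, hd]
          simpa using this
        · exfalso
          have hvlt := (List.getElem?_eq_some_iff.mp hd).1
          simp at hlen
          omega
      · have hk1 : k + 1 < lines.length := by simp at hlen ⊢; omega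
        have : ((k : Int) + 1) = ((k + 1 : Nat) : Int) := by push_cast; ring
        rw [this, PySem.List.pyGetD_natCast]
        have hget : lines[(k+1)]? = some r := by
          have h0 : (lines.drop (k+1))[0]? = some r := by rw [hdrop]; rfl
          simpa [List.getElem?_drop] using h0
        simp [List.getD, hget]
    have hcond : ((k : Int) + 1 < PySem.List.len lines ∧
        PySem.Str.strip (PySem.List.pyGetD lines ((k : Int) + 1) "") = "{")
        ↔ rest.head?.map PySem.Str.strip = some "{" := by
      rcases rest with _ | ⟨r, rs⟩
      · simp [PySem.List.len_eq, hlen]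
      · simp [PySem.List.len_eq, hlen, hnext]
    rw [show PySem.List.enumerate (l :: rest) (k : Int)
          = ((k : Int), l) :: PySem.List.enumerate rest ((k : Int) + 1) from rfl]
    rw [List.foldl_cons]
    have hk1cast : ((k : Int) + 1) = ((k + 1 : Nat) : Int) := by push_cast; ring
    by_cases h1 : (PySem.Str.strip l = "int" ∨ PySem.Str.strip l = "int *" ∨ PySem.Str.strip l = "void" ∨ PySem.Str.strip l = "unsigned int") ∧ rest.head?.map PySem.Str.strip = some "{"
    · have hbr : ((PySem.Str.strip l = "int" ∨ PySem.Str.strip l = "int *" ∨ PySem.Str.strip l = "void" ∨ PySem.Str.strip l = "unsigned int") ∧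
          (k : Int) + 1 < PySem.List.len lines ∧
          PySem.Str.strip (PySem.List.pyGetD lines ((k : Int) + 1) "") = "{") := by
        exact ⟨h1.1, hcond.mpr h1.2⟩
      simp only [if_pos hbr]
      rw [hk1cast, ih (k + 1) hdrop.symm, pvSpecRec_cons, if_pos h1]
      simp [List.append_assoc, Prod.ext_iff]
      omega
    · have hbr1 : ¬ ((PySem.Str.strip l = "int" ∨ PySem.Str.strip l = "int *" ∨ PySem.Str.strip l = "void" ∨ PySem.Str.strip l = "unsigned int") ∧
          (k : Int) + 1 < PySem.List.len lines ∧
          PySem.Str.strip (PySem.List.pyGetD lines ((k : Int) + 1) "") = "{") := by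
        intro h; exact h1 ⟨h.1, hcond.mp h.2⟩
      have hbr2 : ¬ (PySem.Str.strip l = "int *" ∧
          (k : Int) + 1 < PySem.List.len lines ∧
          PySem.Str.strip (PySem.List.pyGetD lines ((k : Int) + 1) "") = "{") := by
        intro h; exact hbr1 ⟨Or.inr (Or.inl h.1), h.2⟩
      simp only [if_neg hbr1, if_neg hbr2]
      rw [hk1cast, ih (k + 1) hdrop.symm, pvSpecRec_cons, if_neg h1]
      simp [List.append_assoc]

theorem pvLoopB (ls : List String) :
    ∀ (acc : List String) (n : Int),
    List.foldr
      (fun (line : String) (st : List String × Int × Bool) =>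
        let stripped := PySem.Str.strip line
        let st' :=
          if st.2.2 = true ∧ (stripped = "int" ∨ stripped = "int *" ∨ stripped = "void" ∨ stripped = "unsigned int") then
            (st.1 ++ [stripped ++ " _unknown_()"], st.2.1 + 1)
          else
            (st.1 ++ [line], st.2.1)
        (st'.1, st'.2, decide (stripped = "{")))
      (acc, n, false) ls
    = (acc ++ (pvSpecRec ls).1.reverse, n + (pvSpecRec ls).2,
        decide (ls.head?.map PySem.Str.strip = some "{")) := by
  induction ls with
  | nil => intro acc n; simp [pvSpecRec]
  | cons l rest ih =>
    intro acc n
    rw [List.foldr_cons, ih]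
    by_cases h1 : (PySem.Str.strip l = "int" ∨ PySem.Str.strip l = "int *" ∨ PySem.Str.strip l = "void" ∨ PySem.Str.strip l = "unsigned int") ∧ rest.head?.map PySem.Str.strip = some "{"
    · have hb : (decide (rest.head?.map PySem.Str.strip = some "{") = true ∧
          (PySem.Str.strip l = "int" ∨ PySem.Str.strip l = "int *" ∨ PySem.Str.strip l = "void" ∨ PySem.Str.strip l = "unsigned int")) := by
        exact ⟨by simpa using h1.2, h1.1⟩
      simp only [if_pos hb]
      rw [pvSpecRec_cons, if_pos h1]
      simp [List.append_assoc, Prod.ext_iff]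
      omega
    · have hb : ¬ (decide (rest.head?.map PySem.Str.strip = some "{") = true ∧
          (PySem.Str.strip l = "int" ∨ PySem.Str.strip l = "int *" ∨ PySem.Str.strip l = "void" ∨ PySem.Str.strip l = "unsigned int")) := by
        intro h; exact h1 ⟨h.2, by simpa using h.1⟩
      simp only [if_neg hb]
      rw [pvSpecRec_cons, if_neg h1]
      simp [List.append_assoc]

-- ===== VERDICT (by name: the statement is the Claim_ definition above) =====
theorem fix_missing_func_name_spec : Claim_equal_fix_missing_func_name := by
  intro text _
  unfold Spec_fix_missing_func_name fix_missing_func_name fix_missing_func_name_alt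
  dsimp only
  rw [List.foldl_reverse]
  rw [pvLoopB ((PySem.Str.split? text "\n").getD []) [] 0]
  have hA := pvLoopA ((PySem.Str.split? text "\n").getD []) 0
      ((PySem.Str.split? text "\n").getD []) rfl [] 0
  simp only [Nat.cast_zero] at hA
  rw [hA]
  simp
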